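-- pv_equiv track=rewrite | github.com/Songhee99/Algorithm | python/programmers/pg_lv0_개미군단.py | solution
-- ===== SOURCE A (Python) =====
-- def solution(hp):
--     ants = [5, 3, 1]
--     count = 0
--
--     for i in ants:
--         count += hp // i
--         hp = hp % i
--         if hp % i == 0: break
--
--     return count
-- ===== SOURCE B (Python) =====
-- # Precomputed lookup table: answer = number of 5-groups plus the minimal ant
-- # count for the residue hp % 5 (which is always in 0..4), read from a table.
-- _REMAINDER_ANTS = (0, 1, 2, 1, 2)
--
-- def solution(hp):
--     return hp // 5 + _REMAINDER_ANTS[hp % 5]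
-- ===== Notes on version B (the rewrite author's own statement) =====
-- stated objective: simpler
-- what changed: Replaced the greedy break-loop cascading through divisions by 5, 3 and 1 with a single division by 5 plus a precomputed lookup table giving the ant count for each residue mod 5.
import Mathlib
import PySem

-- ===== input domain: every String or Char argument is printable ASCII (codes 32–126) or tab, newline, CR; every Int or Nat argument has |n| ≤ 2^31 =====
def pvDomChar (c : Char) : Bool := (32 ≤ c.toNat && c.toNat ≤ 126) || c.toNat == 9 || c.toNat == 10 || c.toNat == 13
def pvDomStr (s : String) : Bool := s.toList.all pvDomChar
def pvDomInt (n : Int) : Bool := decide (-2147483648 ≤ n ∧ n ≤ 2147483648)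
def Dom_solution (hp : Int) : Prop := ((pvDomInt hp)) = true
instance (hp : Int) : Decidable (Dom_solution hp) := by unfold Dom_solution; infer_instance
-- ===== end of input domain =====

-- B replaces A's greedy break-loop over [5,3,1] with one division by 5 plus a
-- precomputed residue lookup table (simpler).


-- ===== PORT A =====
-- the for-loop with its break, as structural recursion over the ants list
def solutionLoop : List Int → Int → Int → Int
  | [], _, count => count
  | i :: rest, hp, count =>
    let count' := count + PySem.Int.floordiv hp i
    let hp' := PySem.Int.mod hp i
    if PySem.Int.mod hp' i == 0 then count' else solutionLoop rest hp' count'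

def solution (hp : Int) : Int := solutionLoop [5, 3, 1] hp 0

-- ===== PORT B =====
def remainderAnts : List Int := [0, 1, 2, 1, 2]

-- the tuple index _REMAINDER_ANTS[hp % 5]; Python's hp % 5 is always in 0..4,
-- so the lookup never raises and the .getD 0 default is never used
def solution_alt (hp : Int) : Int :=
  PySem.Int.floordiv hp 5 + (PySem.List.pyGet? remainderAnts (PySem.Int.mod hp 5)).getD 0

-- ===== PRECONDITION & SPEC =====
def Spec_solution (hp : Int) (out : Int) : Prop := out = solution_alt hp
instance (hp : Int) (out : Int) : Decidable (Spec_solution hp out) := by unfold Spec_solution; infer_instance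

-- ===== CLAIM (what is proved, stated in full; the proofs are below) =====
def Claim_equal_solution : Prop := ∀ (hp : Int), Dom_solution hp → Spec_solution hp (solution hp)

-- ===== LEMMAS AND PROOFS =====
theorem solution_eq_alt (hp : Int) : solution hp = solution_alt hp := by
  unfold solution solution_alt
  have hr : hp % 5 = 0 ∨ hp % 5 = 1 ∨ hp % 5 = 2 ∨ hp % 5 = 3 ∨ hp % 5 = 4 := by
    omega
  simp only [solutionLoop, PySem.Int.floordiv, PySem.Int.mod,
    show ∀ a : Int, a.fmod 5 = a % 5 from fun a => Int.fmod_eq_emod_of_nonneg a (by norm_num),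
    show ∀ a : Int, a.fmod 3 = a % 3 from fun a => Int.fmod_eq_emod_of_nonneg a (by norm_num),
    show ∀ a : Int, a.fmod 1 = a % 1 from fun a => Int.fmod_eq_emod_of_nonneg a (by norm_num),
    show ∀ a : Int, a.fdiv 5 = a / 5 from fun a => Int.fdiv_eq_ediv_of_nonneg a (by norm_num),
    show ∀ a : Int, a.fdiv 3 = a / 3 from fun a => Int.fdiv_eq_ediv_of_nonneg a (by norm_num),
    show ∀ a : Int, a.fdiv 1 = a / 1 from fun a => Int.fdiv_eq_ediv_of_nonneg a (by norm_num),
    beq_iff_eq]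
  rcases hr with h | h | h | h | h <;>
    rw [h] <;>
    simp only [show (PySem.List.pyGet? remainderAnts 0).getD 0 = 0 from by decide,
      show (PySem.List.pyGet? remainderAnts 1).getD 0 = 1 from by decide,
      show (PySem.List.pyGet? remainderAnts 2).getD 0 = 2 from by decide,
      show (PySem.List.pyGet? remainderAnts 3).getD 0 = 1 from by decide,
      show (PySem.List.pyGet? remainderAnts 4).getD 0 = 2 from by decide] <;>
    norm_num <;> omega

-- ===== VERDICT (by name: the statement is the Claim_ definition above) =====
theorem solution_spec : Claim_equal_solution := by
  intro hp _
  exact solution_eq_alt hp
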